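-- pv_equiv track=rewrite | github.com/amishacorns/tpu-inference | tpu_inference/layers/common/fused_moe_gmm.py | _divisors_at_least
-- ===== SOURCE A (Python) =====
-- def _divisors_at_least(n: int, min_val: int = 128) -> list[int]:
--     """All divisors of n that are >= min_val, sorted descending."""
--     divs = set()
--     for i in range(1, int(n**0.5) + 1):
--         if n % i == 0:
--             if i >= min_val:
--                 divs.add(i)
--             if n // i >= min_val:
--                 divs.add(n // i)
--     return sorted(divs, reverse=True)
-- ===== SOURCE B (Python) =====
-- def _divisors_at_least(n: int, min_val: int = 128) -> list[int]:
--     """All divisors of n that are >= min_val, sorted descending."""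
--     if n == 0:
--         return []
--     # prime factorisation of n by trial division
--     m = n
--     factors = []
--     p = 2
--     while p * p <= m:
--         if m % p == 0:
--             e = 0
--             while m % p == 0:
--                 m //= p
--                 e += 1
--             factors.append((p, e))
--         p += 1
--     if m > 1:
--         factors.append((m, 1))
--     # multiplicative enumeration of all divisors
--     divs = [1]
--     for p, e in factors:
--         divs = [d * p ** k for d in divs for k in range(e + 1)]
--     return sorted((d for d in divs if d >= min_val), reverse=True)
-- ===== Notes on version B (the rewrite author's own statement) =====
-- stated objective: alternative
-- what changed: Replaces the paired sqrt(n) divisor scan accumulating a set by a different algorithm: prime-factorise n by trial division, enumerate all divisors multiplicatively from the factorisation, then filter by min_val and sort descending.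
import Mathlib
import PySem

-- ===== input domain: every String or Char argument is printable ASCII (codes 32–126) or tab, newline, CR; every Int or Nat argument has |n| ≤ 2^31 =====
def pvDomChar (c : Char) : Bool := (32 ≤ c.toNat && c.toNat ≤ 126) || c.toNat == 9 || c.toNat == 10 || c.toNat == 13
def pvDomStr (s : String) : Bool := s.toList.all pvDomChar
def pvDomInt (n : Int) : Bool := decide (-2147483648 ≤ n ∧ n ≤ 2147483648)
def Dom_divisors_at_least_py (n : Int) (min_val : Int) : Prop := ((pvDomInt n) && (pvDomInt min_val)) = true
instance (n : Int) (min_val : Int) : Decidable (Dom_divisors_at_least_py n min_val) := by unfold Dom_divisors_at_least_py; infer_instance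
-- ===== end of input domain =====

-- B replaces the paired sqrt(n) divisor scan with a set by a different algorithm:
-- prime-factorise n by trial division, enumerate all divisors multiplicatively, filter, sort.

-- ===== PORT A =====
-- int(n**0.5) is ported as Nat.sqrt n.toNat: exact for 0 ≤ n ≤ 2^31 (a double sqrt cannot
-- cross an integer boundary there); n < 0 (Python TypeError) is excluded by Pre_.
def divisors_at_least_py (n : Int) (min_val : Int) : List Int :=
  let divs : PySem.Set Int :=
    (PySem.List.pyRange 1 ((Nat.sqrt n.toNat : Int) + 1) 1).foldl
      (fun divs i =>
        if PySem.Int.mod n i = 0 then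
          let divs := if i ≥ min_val then PySem.Set.add divs i else divs
          if PySem.Int.floordiv n i ≥ min_val then
            PySem.Set.add divs (PySem.Int.floordiv n i)
          else divs
        else divs)
      PySem.Set.empty
  PySem.List.sorted divs (fun x => x) true

-- ===== PORT B =====
-- inner 'while m % p == 0: m //= p; e += 1' loop of Source B. The fuel argument and the
-- '2 ≤ p ∧ 1 ≤ m' parts of the guard only make the recursion total; at every call the
-- fuel is sufficient (stripP_eq below), so this computes exactly Source B's loop.
def stripP (fuel : Nat) (m p : Int) : Int × Int :=
  match fuel with
  | 0 => (m, 0)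
  | fuel + 1 =>
    if 2 ≤ p ∧ 1 ≤ m ∧ PySem.Int.mod m p = 0 then
      let r := stripP fuel (PySem.Int.floordiv m p) p
      (r.1, r.2 + 1)
    else (m, 0)

-- outer 'while p * p <= m' loop of Source B (returns the final m and the factor list);
-- fuel again only makes the recursion total and is always sufficient (facLoop_eq below)
def facLoop (fuel : Nat) (m p : Int) : Int × List (Int × Int) :=
  match fuel with
  | 0 => (m, [])
  | fuel + 1 =>
    if p * p ≤ m then
      if PySem.Int.mod m p = 0 then
        let s := stripP m.toNat m p
        let r := facLoop fuel s.1 (p + 1)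
        (r.1, (p, s.2) :: r.2)
      else facLoop fuel m (p + 1)
    else (m, [])

def divisors_at_least_py_alt (n : Int) (min_val : Int) : List Int :=
  if n = 0 then []
  else
    let fl := facLoop (n.toNat + 2) n 2
    let facs := fl.2 ++ (if fl.1 > 1 then [(fl.1, 1)] else [])
    let divs := facs.foldl
      (fun divs pe =>
        divs.flatMap (fun d => (PySem.List.pyRange 0 (pe.2 + 1) 1).map (fun k => d * pe.1 ^ k.toNat)))
      [1]
    PySem.List.sorted (divs.filter (fun d => decide (d ≥ min_val))) (fun x => x) true

-- ===== PRECONDITION & SPEC =====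
-- Pre_ excludes exactly n < 0, where the Python A raises TypeError (n**0.5 is complex there).
def Pre_divisors_at_least_py (n : Int) (min_val : Int) : Prop := 0 ≤ n
instance (n : Int) (min_val : Int) : Decidable (Pre_divisors_at_least_py n min_val) := by
  unfold Pre_divisors_at_least_py; infer_instance
def pvWitness_divisors_at_least_py : Int × Int := (12, 3)

def Spec_divisors_at_least_py (n : Int) (min_val : Int) (out : List Int) : Prop := out = divisors_at_least_py_alt n min_val
instance (n : Int) (min_val : Int) (out : List Int) : Decidable (Spec_divisors_at_least_py n min_val out) := by unfold Spec_divisors_at_least_py; infer_instance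

-- ===== CLAIM (what is proved, stated in full; the proofs are below) =====
def Claim_equal_divisors_at_least_py : Prop := ∀ (n : Int) (min_val : Int), Dom_divisors_at_least_py n min_val → Pre_divisors_at_least_py n min_val → Spec_divisors_at_least_py n min_val (divisors_at_least_py n min_val)

-- ===== LEMMAS AND PROOFS =====

-- the divisor set both programs produce (for 0 < n)
def IsWanted (n min_val x : Int) : Prop := x ∣ n ∧ 1 ≤ x ∧ min_val ≤ x

-- one step of A's loop body, as a membership fact
theorem mem_divs_step (n min_val a : Int) (s : PySem.Set Int) (x : Int) :
    (x ∈ (if PySem.Int.mod n a = 0 then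
            let divs := if a ≥ min_val then PySem.Set.add s a else s
            if PySem.Int.floordiv n a ≥ min_val then
              PySem.Set.add divs (PySem.Int.floordiv n a)
            else divs
          else s)) ↔
    x ∈ s ∨ (PySem.Int.mod n a = 0 ∧
      ((min_val ≤ a ∧ x = a) ∨ (min_val ≤ PySem.Int.floordiv n a ∧ x = PySem.Int.floordiv n a))) := by
  split_ifs with h1 h2 h3 h4 <;>
    simp only [PySem.Set.mem_add, ge_iff_le] at * <;> tauto

theorem mem_divs_foldl (n min_val : Int) (L : List Int) (s : PySem.Set Int) (x : Int) :
    x ∈ L.foldl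
      (fun divs i =>
        if PySem.Int.mod n i = 0 then
          let divs := if i ≥ min_val then PySem.Set.add divs i else divs
          if PySem.Int.floordiv n i ≥ min_val then
            PySem.Set.add divs (PySem.Int.floordiv n i)
          else divs
        else divs) s ↔
    x ∈ s ∨ ∃ i ∈ L, PySem.Int.mod n i = 0 ∧
      ((min_val ≤ i ∧ x = i) ∨ (min_val ≤ PySem.Int.floordiv n i ∧ x = PySem.Int.floordiv n i)) := by
  induction L generalizing s with
  | nil => simp
  | cons a L ih =>
    rw [List.foldl_cons, ih, mem_divs_step]
    constructor
    · rintro ((hs | ha) | ⟨i, hiL, hi⟩)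
      · exact Or.inl hs
      · exact Or.inr ⟨a, List.mem_cons_self, ha⟩
      · exact Or.inr ⟨i, List.mem_cons_of_mem _ hiL, hi⟩
    · rintro (hs | ⟨i, hiL, hi⟩)
      · exact Or.inl (Or.inl hs)
      · rcases List.mem_cons.mp hiL with rfl | hiL
        · exact Or.inl (Or.inr hi)
        · exact Or.inr ⟨i, hiL, hi⟩

theorem nodup_divs_foldl (n min_val : Int) (L : List Int) (s : PySem.Set Int) (hs : s.Nodup) :
    (L.foldl
      (fun divs i =>
        if PySem.Int.mod n i = 0 then
          let divs := if i ≥ min_val then PySem.Set.add divs i else divs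
          if PySem.Int.floordiv n i ≥ min_val then
            PySem.Set.add divs (PySem.Int.floordiv n i)
          else divs
        else divs) s).Nodup := by
  induction L generalizing s with
  | nil => exact hs
  | cons a L ih =>
    simp only [List.foldl_cons]
    apply ih
    split_ifs <;> first
      | exact hs
      | exact PySem.Set.nodup_add _ _ hs
      | exact PySem.Set.nodup_add _ _ (PySem.Set.nodup_add _ _ hs)

theorem le_isqrt_iff (n i : Int) (hn : 0 ≤ n) (hi : 0 ≤ i) :
    i ≤ (Nat.sqrt n.toNat : Int) ↔ i * i ≤ n := by
  rw [show i = (i.toNat : Int) by omega, Int.ofNat_le, Nat.le_sqrt]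
  constructor
  · intro h
    have := Int.ofNat_le.mpr h
    push_cast at this
    omega
  · intro h
    have : (i.toNat * i.toNat : Int) ≤ (n.toNat : Int) := by omega
    exact_mod_cast this

theorem fd_eq (n i : Int) (hi : 0 < i) : PySem.Int.floordiv n i = n / i :=
  PySem.Int.floordiv_eq_ediv_of_pos hi

theorem compl_div (n x : Int) (hn : 0 < n) (hx : x ∣ n) (hx1 : 1 ≤ x) :
    n / x ∣ n ∧ 1 ≤ n / x ∧ (n / x) * x = n ∧ n / (n / x) = x := by
  obtain ⟨c, hc⟩ := hx
  have hx0 : x ≠ 0 := by omega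
  have hdiv : n / x = c := by rw [hc, Int.mul_ediv_cancel_left _ hx0]
  have hc1 : 1 ≤ c := by nlinarith
  have hc0 : c ≠ 0 := by omega
  have hdiv2 : n / c = x := by rw [hc, mul_comm, Int.mul_ediv_cancel_left _ hc0]
  exact ⟨by rw [hdiv]; exact ⟨x, by linarith [mul_comm x c]⟩, by omega, by simp only [hdiv]; linarith [mul_comm c x], by rw [hdiv, hdiv2]⟩

theorem mem_A_set (n min_val x : Int) (hn : 0 < n) :
    (x ∈ (PySem.List.pyRange 1 ((Nat.sqrt n.toNat : Int) + 1) 1).foldl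
      (fun divs i =>
        if PySem.Int.mod n i = 0 then
          let divs := if i ≥ min_val then PySem.Set.add divs i else divs
          if PySem.Int.floordiv n i ≥ min_val then
            PySem.Set.add divs (PySem.Int.floordiv n i)
          else divs
        else divs) PySem.Set.empty) ↔ IsWanted n min_val x := by
  rw [mem_divs_foldl]
  simp only [PySem.Set.empty, List.not_mem_nil, false_or, PySem.List.mem_pyRange_one]
  constructor
  · rintro ⟨i, ⟨h1i, hir⟩, hmod, hcase⟩
    have hi0 : 0 < i := by omega
    have hidvd : i ∣ n := (PySem.Int.mod_eq_zero_iff_dvd n i).mp hmod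
    rcases hcase with ⟨hm, rfl⟩ | ⟨hm, rfl⟩
    · exact ⟨hidvd, by omega, hm⟩
    · rw [fd_eq n i hi0] at hm ⊢
      obtain ⟨hd, h1, _, _⟩ := compl_div n i hn hidvd (by omega)
      exact ⟨hd, h1, hm⟩
  · rintro ⟨hdvd, hx1, hxm⟩
    have hx0 : 0 < x := by omega
    obtain ⟨hcd, hc1, hmul, hinv⟩ := compl_div n x hn hdvd hx1
    have hmodx : PySem.Int.mod n x = 0 := (PySem.Int.mod_eq_zero_iff_dvd n x).mpr hdvd
    by_cases hsq : x * x ≤ n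
    · refine ⟨x, ⟨by omega, ?_⟩, hmodx, Or.inl ⟨hxm, rfl⟩⟩
      have := (le_isqrt_iff n x (by omega) (by omega)).mpr hsq
      omega
    · rw [not_le] at hsq
      have hlt : n / x < x := by nlinarith
      have hsq2 : (n / x) * (n / x) ≤ n := by nlinarith
      refine ⟨n / x, ⟨by omega, ?_⟩, (PySem.Int.mod_eq_zero_iff_dvd n (n/x)).mpr hcd,
        Or.inr ⟨?_, ?_⟩⟩
      · have := (le_isqrt_iff n (n/x) (by omega) (by omega)).mpr hsq2
        omega
      · rw [fd_eq n (n/x) (by omega), hinv]; exact hxm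
      · rw [fd_eq n (n/x) (by omega), hinv]

-- ---- Nat mirrors of B's recursions and their specification (proof-only) ----

def stripN (m p : Nat) : Nat × Nat :=
  if h : 2 ≤ p ∧ 1 ≤ m ∧ m % p = 0 then
    let r := stripN (m / p) p
    (r.1, r.2 + 1)
  else (m, 0)
termination_by m
decreasing_by exact Nat.div_lt_self (by omega) (by omega)

theorem stripN_fst_le (m p : Nat) : (stripN m p).1 ≤ m := by
  induction m using stripN.induct (p := p) with
  | case1 x h ih =>
    rw [stripN, dif_pos h]
    exact le_trans ih (Nat.div_le_self _ _)
  | case2 x h => rw [stripN, dif_neg h]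

theorem pvDec_facLoopN (m p m1 : Nat) (hppm : p * p ≤ m) (hle : m1 ≤ m) :
    m1 + 1 - (p + 1) < m + 1 - p := by
  have hpm : p ≤ m := by nlinarith
  omega

def facLoopN (m p : Nat) : Nat × List (Nat × Nat) :=
  if h : p * p ≤ m then
    if m % p = 0 then
      let s := stripN m p
      let r := facLoopN s.1 (p + 1)
      (r.1, (p, s.2) :: r.2)
    else facLoopN m (p + 1)
  else (m, [])
termination_by m + 1 - p
decreasing_by
  · exact pvDec_facLoopN m p _ h (stripN_fst_le m p)
  · exact pvDec_facLoopN m p m h le_rfl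

def genStepN (divs : List Nat) (pe : Nat × Nat) : List Nat :=
  divs.flatMap (fun d => (List.range (pe.2 + 1)).map (fun k => d * pe.1 ^ k))

def genN (F : List (Nat × Nat)) (S : List Nat) : List Nat := F.foldl genStepN S

def fullFacs (m p : Nat) : List (Nat × Nat) :=
  (facLoopN m p).2 ++ (if 1 < (facLoopN m p).1 then [((facLoopN m p).1, 1)] else [])

theorem stripN_spec (m p : Nat) (hp : 2 ≤ p) (hm : 1 ≤ m) :
    m = p ^ (stripN m p).2 * (stripN m p).1 ∧ ¬ p ∣ (stripN m p).1 := by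
  revert hm
  induction m using stripN.induct (p := p) with
  | case1 x h ih =>
    intro hm
    obtain ⟨-, hx, hmod⟩ := h
    have hdvd : p ∣ x := Nat.dvd_of_mod_eq_zero hmod
    have hxp : 1 ≤ x / p := (Nat.one_le_div_iff (by omega)).mpr (Nat.le_of_dvd (by omega) hdvd)
    obtain ⟨heq, hnd⟩ := ih hxp
    rw [stripN.eq_def, dif_pos ⟨by omega, hx, hmod⟩]
    refine ⟨?_, hnd⟩
    have hx' : x = p * (x / p) := (Nat.mul_div_cancel' hdvd).symm
    calc x = p * (x / p) := hx'
    _ = p * (p ^ (stripN (x / p) p).2 * (stripN (x / p) p).1) := by rw [← heq]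
    _ = p ^ ((stripN (x / p) p).2 + 1) * (stripN (x / p) p).1 := by ring
  | case2 x h =>
    intro hm
    rw [stripN.eq_def, dif_neg h]
    refine ⟨by simp, ?_⟩
    intro hdvd
    exact h ⟨hp, hm, Nat.mod_eq_zero_of_dvd hdvd⟩

theorem gen_shift (F : List (Nat × Nat)) (S : List Nat) :
    genN F S = S.flatMap (fun s => (genN F [1]).map (fun t => s * t)) := by
  induction F generalizing S with
  | nil => simp [genN]
  | cons a F ih =>
    have h1 : genN (a :: F) S = genN F (genStepN S a) := rfl
    have h2 : genN (a :: F) [1] = genN F (genStepN [1] a) := rfl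
    rw [h1, h2, ih (genStepN S a), ih (genStepN [1] a)]
    simp only [genStepN, List.flatMap_assoc, List.map_flatMap, List.flatMap_map, List.map_map]
    congr 1; funext s
    simp [mul_assoc, one_mul]

theorem prime_of_least (m p : Nat) (hp : 2 ≤ p) (hdvd : p ∣ m)
    (hmin : ∀ q, 2 ≤ q → q < p → ¬ q ∣ m) : p.Prime := by
  rw [Nat.prime_def_lt]
  refine ⟨hp, fun a halt hadvd => ?_⟩
  by_contra hne
  have ha2 : 2 ≤ a := by
    rcases Nat.eq_zero_or_pos a with h0 | h1
    · subst h0; simp at hadvd; omega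
    · omega
  exact hmin a ha2 halt (hadvd.trans hdvd)

theorem prime_of_no_small (m p : Nat) (hm : 1 < m) (hlt : m < p * p)
    (hmin : ∀ q, 2 ≤ q → q < p → ¬ q ∣ m) : m.Prime := by
  rw [Nat.prime_def_lt]
  refine ⟨hm, fun a halt hadvd => ?_⟩
  by_contra hne
  have ha2 : 2 ≤ a := by
    rcases Nat.eq_zero_or_pos a with h0 | h1
    · subst h0; simp at hadvd; omega
    · omega
  have hap : p ≤ a := by
    by_contra hlt2
    exact hmin a ha2 (by omega) hadvd
  have hbdvd : m / a ∣ m := Nat.div_dvd_of_dvd hadvd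
  have hab : a * (m / a) = m := Nat.mul_div_cancel' hadvd
  have hb2 : 2 ≤ m / a := by
    rcases Nat.lt_or_ge (m / a) 2 with hb | hb
    · interval_cases h : (m / a) <;> omega
    · exact hb
  have hbp : m / a < p := by
    by_contra hge
    nlinarith [hab]
  exact hmin (m / a) hb2 hbp hbdvd

theorem dvd_pow_mul_iff (p e m x : Nat) (hp : p.Prime) :
    x ∣ p ^ e * m ↔ ∃ k ≤ e, ∃ t, t ∣ m ∧ x = p ^ k * t := by
  constructor
  · intro h
    obtain ⟨a, b, ha, hb, hab⟩ := Nat.dvd_mul.mp h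
    obtain ⟨k, hk, rfl⟩ := (Nat.dvd_prime_pow hp).mp ha
    exact ⟨k, hk, b, hb, hab.symm⟩
  · rintro ⟨k, hk, t, ht, rfl⟩
    exact mul_dvd_mul (pow_dvd_pow p hk) ht

theorem gen_cons_mem (p e : Nat) (F : List (Nat × Nat)) (x : Nat) :
    x ∈ genN ((p, e) :: F) [1] ↔ ∃ k ≤ e, ∃ t ∈ genN F [1], x = p ^ k * t := by
  rw [show genN ((p, e) :: F) [1] = genN F (genStepN [1] (p, e)) from rfl, gen_shift]
  simp only [genStepN, List.flatMap_cons, List.flatMap_nil, List.append_nil, List.mem_flatMap,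
    List.mem_map, List.mem_range, Nat.lt_succ_iff, one_mul]
  constructor
  · rintro ⟨s, ⟨k, hk, rfl⟩, t, ht, rfl⟩
    exact ⟨k, hk, t, ht, rfl⟩
  · rintro ⟨k, hk, t, ht, rfl⟩
    exact ⟨p ^ k, ⟨k, hk, rfl⟩, t, ht, rfl⟩

theorem gen_cons_nodup (p e : Nat) (F : List (Nat × Nat)) (hp : 2 ≤ p)
    (hG : (genN F [1]).Nodup) (m' : Nat) (hmem : ∀ t ∈ genN F [1], t ∣ m')
    (hnp : ¬ p ∣ m') : (genN ((p, e) :: F) [1]).Nodup := by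
  rw [show genN ((p, e) :: F) [1] = genN F (genStepN [1] (p, e)) from rfl, gen_shift,
    List.nodup_flatMap]
  have hform : genStepN [1] (p, e) = (List.range (e + 1)).map (fun k => p ^ k) := by
    simp [genStepN]
  constructor
  · intro s hs
    rw [hform, List.mem_map] at hs
    obtain ⟨k, -, rfl⟩ := hs
    exact hG.map (fun a b h => mul_left_cancel₀ (a := p ^ k) (by positivity) h)
  · rw [hform, List.pairwise_map]
    refine (List.pairwise_lt_range).imp ?_
    intro k j hkj x hx1 hx2
    obtain ⟨t, ht, rfl⟩ := List.mem_map.mp hx1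
    obtain ⟨t', ht', heq⟩ := List.mem_map.mp hx2
    have hj : p ^ j = p ^ k * p ^ (j - k) := by rw [← pow_add]; congr 1; omega
    rw [hj] at heq
    have : p ^ (j - k) * t' = t := by
      apply mul_left_cancel₀ (a := p ^ k) (by positivity)
      rw [mul_assoc] at heq
      exact heq
    have hpt : p ∣ t := by
      rw [← this]
      exact Dvd.dvd.mul_right (dvd_pow_self p (by omega)) t'
    exact hnp (hpt.trans (hmem t ht))

theorem facLoopN_spec (m p : Nat) : 2 ≤ p → 1 ≤ m → (∀ q, 2 ≤ q → q < p → ¬ q ∣ m) →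
    (∀ x, x ∈ genN (fullFacs m p) [1] ↔ x ∣ m) ∧ (genN (fullFacs m p) [1]).Nodup := by
  induction m, p using facLoopN.induct with
  | case1 m p hppm hmod s ih =>
    have hs : s = stripN m p := rfl
    intro hp hm hmin
    have hfc : facLoopN m p = ((facLoopN (stripN m p).1 (p + 1)).1,
        (p, (stripN m p).2) :: (facLoopN (stripN m p).1 (p + 1)).2) := by
      rw [facLoopN.eq_def, dif_pos hppm, if_pos hmod]
    have hff : fullFacs m p = (p, (stripN m p).2) :: fullFacs (stripN m p).1 (p + 1) := by
      rw [fullFacs, fullFacs, hfc]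
      simp
    obtain ⟨heq, hndp⟩ := stripN_spec m p hp hm
    set e := (stripN m p).2
    set m' := (stripN m p).1 with hm'def
    have hm' : 1 ≤ m' := by
      rcases Nat.eq_zero_or_pos m' with h0 | h1
      · rw [h0, mul_zero] at heq; omega
      · exact h1
    have hpdvd : p ∣ m := Nat.dvd_of_mod_eq_zero hmod
    have hprime : p.Prime := prime_of_least m p hp hpdvd hmin
    have hm'dvd : m' ∣ m := ⟨p ^ e, by rw [heq]; ring⟩
    have hmin' : ∀ q, 2 ≤ q → q < p + 1 → ¬ q ∣ m' := by
      intro q h2 hlt hdvd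
      rcases Nat.lt_or_ge q p with hqp | hqp
      · exact hmin q h2 hqp (hdvd.trans hm'dvd)
      · have : q = p := by omega
        exact hndp (this ▸ hdvd)
    obtain ⟨ihmem, ihnd⟩ := ih (by omega) hm' hmin'
    constructor
    · intro x
      rw [hff, gen_cons_mem, show m = p ^ e * m' from heq,
        dvd_pow_mul_iff p e m' x hprime]
      constructor
      · rintro ⟨k, hk, t, ht, rfl⟩
        exact ⟨k, hk, t, (ihmem t).mp ht, rfl⟩
      · rintro ⟨k, hk, t, ht, rfl⟩
        exact ⟨k, hk, t, (ihmem t).mpr ht, rfl⟩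
    · rw [hff]
      exact gen_cons_nodup p e _ hp ihnd m' (fun t ht => (ihmem t).mp ht) hndp
  | case2 m p hppm hmod ih =>
    intro hp hm hmin
    have hfc : facLoopN m p = facLoopN m (p + 1) := by
      rw [facLoopN.eq_def, dif_pos hppm, if_neg hmod]
    have hff : fullFacs m p = fullFacs m (p + 1) := by
      rw [fullFacs, fullFacs, hfc]
    have hmin' : ∀ q, 2 ≤ q → q < p + 1 → ¬ q ∣ m := by
      intro q h2 hlt hdvd
      rcases Nat.lt_or_ge q p with hqp | hqp
      · exact hmin q h2 hqp hdvd
      · have : q = p := by omega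
        exact hmod (this ▸ Nat.mod_eq_zero_of_dvd hdvd)
    rw [hff]
    exact ih (by omega) hm hmin'
  | case3 m p h =>
    intro hp hm hmin
    have hfc : facLoopN m p = (m, []) := by rw [facLoopN.eq_def, dif_neg h]
    have hff : fullFacs m p = if 1 < m then [(m, 1)] else [] := by
      rw [fullFacs, hfc]; simp
    rcases Nat.lt_or_ge 1 m with hm1 | hm1
    · have hprime : m.Prime := prime_of_no_small m p hm1 (by omega) hmin
      rw [hff, if_pos hm1]
      have hgen : genN [(m, 1)] [1] = [1, m] := by
        show genStepN [1] (m, 1) = [1, m]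
        simp [genStepN, List.range_succ]
      rw [hgen]
      constructor
      · intro x
        simp only [List.mem_cons, List.not_mem_nil, or_false]
        constructor
        · rintro (rfl | rfl)
          · exact one_dvd _
          · exact dvd_rfl
        · intro hdvd
          exact hprime.eq_one_or_self_of_dvd x hdvd
      · simp [Nat.ne_of_lt hm1]
    · have : m = 1 := by omega
      subst this
      rw [hff, if_neg (by omega)]
      constructor
      · intro x; simp [genN, Nat.dvd_one]
      · simp [genN]

-- ---- bridges: the Int ports compute the casted Nat mirrors ----

theorem stripP_eq (m p : Nat) (fuel : Nat) (hf : m ≤ fuel) :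
    stripP fuel (m : Int) (p : Int) = (((stripN m p).1 : Int), ((stripN m p).2 : Int)) := by
  induction m using stripN.induct (p := p) generalizing fuel with
  | case1 x h ih =>
    obtain ⟨hp, hx, hmod⟩ := h
    have hcondN : 2 ≤ p ∧ 1 ≤ x ∧ x % p = 0 := ⟨hp, hx, hmod⟩
    have hcondI : (2:Int) ≤ (p:Int) ∧ (1:Int) ≤ (x:Int) ∧ PySem.Int.mod (x:Int) (p:Int) = 0 :=
      ⟨by exact_mod_cast hp, by exact_mod_cast hx, by rw [PySem.Int.mod_natCast]; exact_mod_cast hmod⟩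
    match fuel, hf with
    | 0, hf => omega
    | fuel + 1, hf =>
      have hrec : x / p ≤ fuel := by
        have := Nat.div_lt_self (by omega : 0 < x) (by omega : 1 < p)
        omega
      rw [stripP, stripN.eq_def, dif_pos hcondN, if_pos hcondI,
        PySem.Int.floordiv_natCast, ih fuel hrec]
      simp
  | case2 x h =>
    have hcond : ¬((2:Int) ≤ (p:Int) ∧ (1:Int) ≤ (x:Int) ∧ PySem.Int.mod (x:Int) (p:Int) = 0) := by
      intro ⟨h1, h2, h3⟩
      rw [PySem.Int.mod_natCast] at h3
      exact h ⟨by exact_mod_cast h1, by exact_mod_cast h2, by exact_mod_cast h3⟩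
    match fuel with
    | 0 => rw [stripP, stripN.eq_def, dif_neg h]; simp
    | fuel + 1 => rw [stripP, stripN.eq_def, dif_neg h, if_neg hcond]; simp

theorem facLoop_eq (m p : Nat) (fuel : Nat) (hf : m + 1 - p ≤ fuel) :
    facLoop fuel (m : Int) (p : Int) =
      (((facLoopN m p).1 : Int), (facLoopN m p).2.map (fun q => ((q.1 : Int), (q.2 : Int)))) := by
  induction m, p using facLoopN.induct generalizing fuel with
  | case1 m p hppm hmod s ih =>
    have hpm : p ≤ m := by nlinarith
    have hcondI : (p : Int) * (p : Int) ≤ (m : Int) := by exact_mod_cast hppm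
    have hmodI : PySem.Int.mod (m : Int) (p : Int) = 0 := by
      rw [PySem.Int.mod_natCast]; exact_mod_cast hmod
    match fuel, hf with
    | 0, hf => omega
    | fuel + 1, hf =>
      have hstrip : stripP ((m : Int)).toNat (m : Int) (p : Int) =
          (((stripN m p).1 : Int), ((stripN m p).2 : Int)) := by
        rw [Int.toNat_natCast]
        exact stripP_eq m p m le_rfl
      have hrec : (stripN m p).1 + 1 - (p + 1) ≤ fuel := by
        have h1 : (stripN m p).1 ≤ m := stripN_fst_le m p
        omega
      have ih' : facLoop fuel ((stripN m p).1 : Int) ((p + 1 : Nat) : Int) =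
          (((facLoopN (stripN m p).1 (p + 1)).1 : Int),
            (facLoopN (stripN m p).1 (p + 1)).2.map (fun q => ((q.1 : Int), (q.2 : Int)))) :=
        ih fuel hrec
      rw [facLoop, facLoopN.eq_def, dif_pos hppm, if_pos hmod, if_pos hcondI, if_pos hmodI]
      simp only [hstrip, show ((p : Int) + 1) = ((p + 1 : Nat) : Int) by push_cast; ring, ih']
      simp
  | case2 m p hppm hmod ih =>
    have hpm : p ≤ m := by nlinarith
    have hcondI : (p : Int) * (p : Int) ≤ (m : Int) := by exact_mod_cast hppm
    have hmodI : ¬ PySem.Int.mod (m : Int) (p : Int) = 0 := by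
      rw [PySem.Int.mod_natCast]; exact_mod_cast hmod
    match fuel, hf with
    | 0, hf => omega
    | fuel + 1, hf =>
      rw [facLoop, facLoopN.eq_def, dif_pos hppm, if_neg hmod, if_pos hcondI, if_neg hmodI,
        show ((p : Int) + 1) = ((p + 1 : Nat) : Int) by push_cast; ring,
        ih fuel (by omega)]
  | case3 m p h =>
    have hcondI : ¬ (p : Int) * (p : Int) ≤ (m : Int) := by exact_mod_cast h
    match fuel with
    | 0 => rw [facLoop, facLoopN.eq_def, dif_neg h]; simp
    | fuel + 1 => rw [facLoop, facLoopN.eq_def, dif_neg h, if_neg hcondI]; simp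

theorem genStep_eq (S : List Nat) (p e : Nat) :
    (S.map (fun x => (Int.ofNat x))).flatMap
      (fun d => (PySem.List.pyRange 0 ((e : Int) + 1) 1).map (fun k => d * (p : Int) ^ k.toNat))
      = (genStepN S (p, e)).map (fun x => (Int.ofNat x)) := by
  induction S with
  | nil => rfl
  | cons x S ih =>
    simp only [List.map_cons, List.flatMap_cons, genStepN] at ih ⊢
    rw [show ((e : Int) + 1) = ((e + 1 : Nat) : Int) by push_cast; ring,
      PySem.List.pyRange_zero_nat] at ih ⊢
    rw [ih, List.map_append]
    congr 1
    simp only [List.map_map]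
    refine List.map_congr_left (fun k _ => ?_)
    simp only [Function.comp_apply, Int.toNat_natCast, Int.ofNat_eq_natCast]
    push_cast
    ring

theorem gen_eq (F : List (Nat × Nat)) (S : List Nat) :
    (F.map (fun q => ((q.1 : Int), (q.2 : Int)))).foldl
      (fun divs pe =>
        divs.flatMap (fun d => (PySem.List.pyRange 0 (pe.2 + 1) 1).map (fun k => d * pe.1 ^ k.toNat)))
      (S.map (fun x => (Int.ofNat x))) = (genN F S).map (fun x => (Int.ofNat x)) := by
  induction F generalizing S with
  | nil => rfl
  | cons a F ih =>
    obtain ⟨p, e⟩ := a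
    show (F.map _).foldl _ _ = (genN F (genStepN S (p, e))).map _
    rw [← ih (genStepN S (p, e))]
    congr 1
    simpa using genStep_eq S p e

-- ---- assembly ----

theorem alt_eq (n min_val : Int) (hn : 0 < n) :
    divisors_at_least_py_alt n min_val =
      PySem.List.sorted
        (((genN (fullFacs n.toNat 2) [1]).map (fun y => Int.ofNat y)).filter
          (fun d => decide (d ≥ min_val))) (fun x => x) true := by
  rw [divisors_at_least_py_alt, if_neg (by omega)]
  have hn' : ((n.toNat : Nat) : Int) = n := Int.toNat_of_nonneg (by omega)
  have h2 : facLoop (n.toNat + 2) n 2 = (((facLoopN n.toNat 2).1 : Int),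
      (facLoopN n.toNat 2).2.map (fun q => ((q.1 : Int), (q.2 : Int)))) := by
    rw [← hn', show (2 : Int) = ((2 : Nat) : Int) by norm_num]
    exact facLoop_eq n.toNat 2 (n.toNat + 2) (by omega)
  have hfacs : (facLoop (n.toNat + 2) n 2).2 ++ (if (facLoop (n.toNat + 2) n 2).1 > 1 then [((facLoop (n.toNat + 2) n 2).1, 1)] else [])
      = (fullFacs n.toNat 2).map (fun q => ((q.1 : Int), (q.2 : Int))) := by
    rw [h2, fullFacs]
    dsimp only
    by_cases h : 1 < (facLoopN n.toNat 2).1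
    · rw [if_pos h, if_pos (by exact_mod_cast h), List.map_append]
      simp
    · rw [if_neg h, if_neg (by exact_mod_cast h)]
      simp
  show PySem.List.sorted ((((facLoop (n.toNat + 2) n 2).2 ++ (if (facLoop (n.toNat + 2) n 2).1 > 1 then [((facLoop (n.toNat + 2) n 2).1, 1)] else [])).foldl
      (fun (divs : List Int) (pe : Int × Int) =>
        divs.flatMap (fun d => (PySem.List.pyRange 0 (pe.2 + 1) 1).map (fun (k : Int) => d * pe.1 ^ k.toNat)))
      [1]).filter (fun d => decide (d ≥ min_val))) (fun x => x) true = _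
  rw [hfacs, show ([1] : List Int) = ([1] : List Nat).map (fun x => Int.ofNat x) from rfl, gen_eq]

theorem mem_B_filtered (n min_val x : Int) (hn : 0 < n) :
    (x ∈ (((genN (fullFacs n.toNat 2) [1]).map (fun y => Int.ofNat y)).filter
        (fun d => decide (d ≥ min_val)))) ↔ IsWanted n min_val x := by
  unfold IsWanted
  have hspec := facLoopN_spec n.toNat 2 le_rfl (by omega) (by intro q hq hlt; omega)
  simp only [List.mem_filter, List.mem_map, decide_eq_true_eq, ge_iff_le, Int.ofNat_eq_natCast]
  constructor
  · rintro ⟨⟨y, hy, rfl⟩, hge⟩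
    have hyd : y ∣ n.toNat := (hspec.1 y).mp hy
    have hy1 : 0 < y := Nat.pos_of_dvd_of_pos hyd (by omega)
    refine ⟨?_, by exact_mod_cast hy1, hge⟩
    have : (y : Int) ∣ ((n.toNat : Nat) : Int) := Int.natCast_dvd_natCast.mpr hyd
    rwa [Int.toNat_of_nonneg (by omega)] at this
  · rintro ⟨hdvd, hx1, hxm⟩
    have h1 : x.toNat ∣ n.toNat := by
      apply Int.natCast_dvd_natCast.mp
      rw [Int.toNat_of_nonneg (by omega), Int.toNat_of_nonneg (by omega)]
      exact hdvd
    exact ⟨⟨x.toNat, (hspec.1 _).mpr h1, by omega⟩, hxm⟩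

theorem nodup_B_filtered (n min_val : Int) (hn : 0 < n) :
    ((((genN (fullFacs n.toNat 2) [1]).map (fun y => Int.ofNat y)).filter
        (fun d => decide (d ≥ min_val)))).Nodup := by
  have hspec := facLoopN_spec n.toNat 2 le_rfl (by omega) (by intro q hq hlt; omega)
  exact (hspec.2.map (fun a b h => Int.ofNat.inj h)).filter _

-- ===== VERDICT (by name: the statement is the Claim_ definition above) =====
theorem divisors_at_least_py_spec : Claim_equal_divisors_at_least_py := by
  intro n min_val _ hpre
  unfold Spec_divisors_at_least_py
  rcases lt_or_eq_of_le hpre with hn | hn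
  · have hB := alt_eq n min_val hn
    set fl := ((genN (fullFacs n.toNat 2) [1]).map (fun y => Int.ofNat y)).filter
        (fun d => decide (d ≥ min_val)) with hfl
    have hperm : (PySem.List.sorted fl (fun x => x) true).Perm fl :=
      PySem.List.sorted_perm fl (fun x => x) true
    have hnd : (PySem.List.sorted fl (fun x => x) true).Nodup :=
      hperm.nodup_iff.mpr (nodup_B_filtered n min_val hn)
    have hpw : (PySem.List.sorted fl (fun x => x) true).Pairwise (fun a b => b < a) := by
      have h1 := PySem.List.sorted_pairwise_rev fl (fun x => x)
      exact (h1.and hnd).imp (fun h => lt_of_le_of_ne h.1 (Ne.symm h.2))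
    unfold divisors_at_least_py
    rw [hB]
    apply PySem.List.sorted_rev_eq_of_perm_of_pairwise_gt
    · refine hperm.trans ?_
      rw [hfl]
      rw [List.perm_ext_iff_of_nodup (nodup_B_filtered n min_val hn)
        (nodup_divs_foldl n min_val _ _ (show (PySem.Set.empty : PySem.Set Int).Nodup from List.nodup_nil))]
      intro x
      rw [mem_B_filtered n min_val x hn, mem_A_set n min_val x hn]
    · exact hpw
  · subst hn
    rw [divisors_at_least_py_alt, if_pos rfl]
    simp [divisors_at_least_py, PySem.List.pyRange, PySem.List.sorted]
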